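-- pv_equiv track=rewrite | github.com/msgomez06/TCBench_0.1 | scripts/scripts/utils.py | remove_consecutive_elements
-- ===== SOURCE A (Python) =====
-- def remove_consecutive_elements(lst: list, nb_idx:int) -> bool:
--
--     if len(lst) == 0:
--         return True
--
--     if len(lst) > nb_idx//2:
--         return False
--
--     if lst[0] == 0:
--         i = 0
--         while i < len(lst) - 1 and lst[i+1] == lst[i] + 1:
--             i += 1
--         lst = lst[i+1:]
--
--     if len(lst) == 0:
--         return True
--
--     if lst[-1] == nb_idx-1:
--         i = -1
--         while i > -len(lst) and lst[i-1] == lst[i] - 1: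
--             i -= 1
--         lst = lst[:i]
--
--     return len(lst) == 0
-- ===== SOURCE B (Python) =====
-- def remove_consecutive_elements(lst: list, nb_idx: int) -> bool:
--     if len(lst) == 0:
--         return True
--     if len(lst) > nb_idx // 2:
--         return False
--     n = len(lst)
--     switched = False
--     for j, x in enumerate(lst):
--         if not switched and x == j:
--             continue
--         switched = True
--         if x != nb_idx - n + j:
--             return False
--     return True
-- ===== Notes on version B (the rewrite author's own statement) =====
-- stated objective: alternative
-- what changed: A does two staged destructive passes (strip a front run by slicing and reassigning, then strip a back run via negative-index slicing) and tests emptiness of what remains; B is a single forward pass over enumerate(lst) driving a two-state machine (front mode: x==j; after one mismatch it switches permanently to back mode and requires x==nb_idx-n+j), returning False on the first violation.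
import Mathlib
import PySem

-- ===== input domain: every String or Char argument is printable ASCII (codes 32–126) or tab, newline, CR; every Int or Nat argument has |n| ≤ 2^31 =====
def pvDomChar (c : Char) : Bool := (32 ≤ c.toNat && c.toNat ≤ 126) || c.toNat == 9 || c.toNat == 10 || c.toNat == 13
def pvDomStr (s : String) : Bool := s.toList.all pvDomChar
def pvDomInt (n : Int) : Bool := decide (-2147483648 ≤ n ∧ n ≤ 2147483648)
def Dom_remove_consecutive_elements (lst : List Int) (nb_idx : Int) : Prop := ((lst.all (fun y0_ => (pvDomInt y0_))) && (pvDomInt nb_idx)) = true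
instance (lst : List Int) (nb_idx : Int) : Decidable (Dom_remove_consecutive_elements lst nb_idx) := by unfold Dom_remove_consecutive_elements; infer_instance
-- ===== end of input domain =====

-- B replaces A's two staged destructive slice-and-reassign passes by ONE forward pass over the
-- enumerated list driving a two-state machine (front mode x==j, then permanently back mode
-- x==nb_idx-n+j); objective: alternative (same cost, no slicing, no intermediate lists).

-- ===== PORT A =====
-- A's first while loop: i = 0; while i < len(lst)-1 and lst[i+1] == lst[i]+1: i += 1
-- (these indices are always in range, so Python lst[i] is List.getD i 0 here)
def aFront (lst : List Int) (i : Nat) : Nat :=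
  if h : i + 1 < lst.length ∧ lst.getD (i+1) 0 = lst.getD i 0 + 1 then
    aFront lst (i+1)
  else i
termination_by lst.length - i
decreasing_by omega

-- A's second while loop (negative Python indices): i = -1; while i > -len(lst) and lst[i-1] == lst[i]-1: i -= 1
def aBack (lst : List Int) (i : Int) : Int :=
  if h : -(lst.length : Int) < i ∧
      (PySem.List.pyGet? lst (i-1)).getD 0 = (PySem.List.pyGet? lst i).getD 0 - 1 then
    aBack lst (i-1)
  else i
termination_by (lst.length + i).toNat
decreasing_by omega

-- A's first reassignment: lst = lst[i+1:] after the front walk (guarded by lst[0] == 0)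
def aPhase1 (lst : List Int) : List Int :=
  if lst.getD 0 0 = 0 then
    PySem.List.slice lst (some ((aFront lst 0 : Int) + 1)) none     -- lst[i+1:]
  else lst

-- A's second reassignment: lst = lst[:i] after the back walk (guarded by lst[-1] == nb_idx-1)
def aPhase2 (lst : List Int) (nb_idx : Int) : List Int :=
  if (PySem.List.pyGet? lst (-1)).getD 0 = nb_idx - 1 then
    PySem.List.slice lst none (some (aBack lst (-1)))               -- lst[:i]
  else lst

def remove_consecutive_elements (lst : List Int) (nb_idx : Int) : Bool :=
  if lst.length = 0 then true
  else if (lst.length : Int) > PySem.Int.floordiv nb_idx 2 then false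
  else if (aPhase1 lst).length = 0 then true
  else decide ((aPhase2 (aPhase1 lst) nb_idx).length = 0)

-- ===== PORT B =====
-- B's for-loop over enumerate(lst) with the 'switched' flag; j is the running index, the
-- 'continue' branch keeps sw, the other branch sets it to true or returns False.
def bScan (nb_idx : Int) (n : Nat) : List Int → Nat → Bool → Bool
  | [], _, _ => true
  | x :: t, j, sw =>
    if sw = false ∧ x = (j : Int) then bScan nb_idx n t (j+1) sw
    else if x = nb_idx - (n : Int) + (j : Int) then bScan nb_idx n t (j+1) true
    else false

def remove_consecutive_elements_alt (lst : List Int) (nb_idx : Int) : Bool :=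
  if lst.length = 0 then true
  else if (lst.length : Int) > PySem.Int.floordiv nb_idx 2 then false
  else bScan nb_idx lst.length lst 0 false

-- ===== PRECONDITION & SPEC =====
def Spec_remove_consecutive_elements (lst : List Int) (nb_idx : Int) (out : Bool) : Prop := out = remove_consecutive_elements_alt lst nb_idx
instance (lst : List Int) (nb_idx : Int) (out : Bool) : Decidable (Spec_remove_consecutive_elements lst nb_idx out) := by unfold Spec_remove_consecutive_elements; infer_instance

-- ===== CLAIM (what is proved, stated in full; the proofs are below) =====
def Claim_equal_remove_consecutive_elements : Prop := ∀ (lst : List Int) (nb_idx : Int), Dom_remove_consecutive_elements lst nb_idx → Spec_remove_consecutive_elements lst nb_idx (remove_consecutive_elements lst nb_idx)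

-- ===== LEMMAS AND PROOFS =====

-- pvCnt s xs v: length of the longest prefix of xs matching v, v+s, v+2s, …
def pvCnt (s : Int) : List Int → Int → Nat
  | [], _ => 0
  | x :: xs, v => if x = v then pvCnt s xs (v + s) + 1 else 0

-- pvChain s xs: number of adjacent pairs at the front of xs whose difference is s
def pvChain (s : Int) : List Int → Nat
  | x :: y :: t => if y = x + s then pvChain s (y :: t) + 1 else 0
  | _ => 0

-- pvFull s v l: the WHOLE list matches v, v+s, v+2s, …
def pvFull (s v : Int) (l : List Int) : Prop := ∀ i (_ : i < l.length), l[i] = v + s * i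

lemma getD_eq_get (l : List Int) (n : Nat) (h : n < l.length) : l.getD n 0 = l[n] := by
  simp [List.getD_eq_getElem?_getD, List.getElem?_eq_getElem h]

lemma pvCnt_head_ne (s : Int) (x v : Int) (xs : List Int) (h : x ≠ v) :
    pvCnt s (x :: xs) v = 0 := by
  simp [pvCnt, h]

lemma pvCnt_le_length (s : Int) (xs : List Int) : ∀ v, pvCnt s xs v ≤ xs.length := by
  induction xs with
  | nil => intro v; simp [pvCnt]
  | cons x t ih =>
    intro v
    simp only [pvCnt, List.length_cons]
    split
    · exact Nat.succ_le_succ (ih _)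
    · omega

lemma pvCnt_take (s : Int) (xs : List Int) : ∀ m v, pvCnt s (xs.take m) v = min (pvCnt s xs v) m := by
  induction xs with
  | nil => intro m v; simp [pvCnt]
  | cons x t ih =>
    intro m v
    cases m with
    | zero => simp [pvCnt]
    | succ m =>
      simp only [List.take_succ_cons, pvCnt]
      split
      · rw [ih]; omega
      · simp

lemma pvCnt_cons_eq_chain (s : Int) : ∀ (xs : List Int) (x v : Int), x = v →
    pvCnt s (x :: xs) v = pvChain s (x :: xs) + 1 := by
  intro xs
  induction xs with
  | nil => intro x v h; simp [pvCnt, pvChain, h]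
  | cons y t ih =>
    intro x v h
    subst h
    rw [show pvCnt s (x :: y :: t) x = pvCnt s (y :: t) (x + s) + 1 by simp [pvCnt]]
    by_cases hy : y = x + s
    · rw [ih y (x + s) hy]
      simp [pvChain, hy]
    · rw [pvCnt_head_ne s y (x + s) t hy]
      simp [pvChain, hy]

lemma pvCnt_eq_length_iff (s : Int) : ∀ (l : List Int) (v : Int),
    pvCnt s l v = l.length ↔ pvFull s v l := by
  intro l
  induction l with
  | nil => intro v; simp [pvCnt, pvFull]
  | cons x t ih =>
    intro v
    by_cases hx : x = v
    · subst hx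
      rw [show pvCnt s (x :: t) x = pvCnt s t (x + s) + 1 by simp [pvCnt]]
      simp only [List.length_cons, Nat.add_right_cancel_iff]
      rw [ih (x + s)]
      constructor
      · intro hfull i hi
        cases i with
        | zero => simp
        | succ i =>
          have := hfull i (by simpa using hi)
          simp only [List.getElem_cons_succ, this]
          push_cast; ring
      · intro hfull i hi
        have := hfull (i+1) (by simpa using hi)
        simp only [List.getElem_cons_succ] at this
        rw [this]; push_cast; ring
    · rw [pvCnt_head_ne s x v t hx]
      constructor
      · intro h; simp at h
      · intro hfull
        exfalso; apply hx
        have := hfull 0 (by simp)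
        simpa using this

lemma pvFull_reverse (v : Int) (l : List Int) :
    pvFull 1 v l ↔ pvFull (-1) (v + l.length - 1) l.reverse := by
  constructor
  · intro h i hi
    have hi' : i < l.length := by simpa using hi
    rw [List.getElem_reverse]
    have := h (l.length - 1 - i) (by omega)
    rw [this]
    have : ((l.length - 1 - i : Nat) : Int) = (l.length : Int) - 1 - i := by omega
    rw [this]; ring
  · intro h i hi
    have hrev : l.length - 1 - i < l.reverse.length := by simp; omega
    have := h (l.length - 1 - i) hrev
    rw [List.getElem_reverse] at this
    have hidx : l.length - 1 - (l.length - 1 - i) = i := by omega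
    simp only [hidx] at this
    rw [this]
    have : ((l.length - 1 - i : Nat) : Int) = (l.length : Int) - 1 - i := by omega
    rw [this]; ring

-- the back-mode state of B's loop: the whole remainder must match nb-n+j, nb-n+j+1, …
lemma bScan_back (nb : Int) (n : Nat) : ∀ (l : List Int) (j : Nat),
    bScan nb n l j true = decide (pvCnt 1 l (nb - n + j) = l.length) := by
  intro l
  induction l with
  | nil => intro j; simp [bScan, pvCnt]
  | cons x t ih =>
    intro j
    rw [bScan, if_neg (by simp)]
    by_cases hx : x = nb - n + j
    · rw [if_pos hx, ih (j+1)]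
      rw [show pvCnt 1 (x :: t) (nb - n + j) = pvCnt 1 t (nb - n + j + 1) + 1 by
        simp [pvCnt, hx]]
      have harg : nb - (n : Int) + ((j + 1 : Nat) : Int) = nb - n + j + 1 := by push_cast; ring
      rw [harg]
      simp only [List.length_cons, decide_eq_decide]
      omega
    · rw [if_neg hx, pvCnt_head_ne 1 x _ t hx]
      simp

-- the front-mode state of B's loop, characterised by the greedy front-run length pvCnt 1 l j
lemma bScan_front (nb : Int) (n : Nat) : ∀ (l : List Int) (j : Nat),
    bScan nb n l j false =
      decide (pvCnt 1 (l.drop (pvCnt 1 l (j : Int))) (nb - n + j + (pvCnt 1 l (j : Int) : Int))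
        = l.length - pvCnt 1 l (j : Int)) := by
  intro l
  induction l with
  | nil => intro j; simp [bScan, pvCnt]
  | cons x t ih =>
    intro j
    rw [bScan]
    by_cases hx : x = (j : Int)
    · rw [if_pos ⟨rfl, hx⟩, ih (j+1)]
      have hcnt : pvCnt 1 (x :: t) (j : Int) = pvCnt 1 t ((j : Int) + 1) + 1 := by
        simp [pvCnt, hx]
      have hcast : ((j + 1 : Nat) : Int) = (j : Int) + 1 := by push_cast; ring
      rw [hcnt, hcast]
      simp only [List.drop_succ_cons, List.length_cons, decide_eq_decide]
      constructor
      · intro h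
        rw [show nb - (n : Int) + j + ((pvCnt 1 t ((j : Int) + 1) + 1 : Nat) : Int)
            = nb - n + ((j : Int) + 1) + (pvCnt 1 t ((j : Int) + 1) : Int) by push_cast; ring]
        rw [h]; omega
      · intro h
        rw [show nb - (n : Int) + ((j : Int) + 1) + (pvCnt 1 t ((j : Int) + 1) : Int)
            = nb - n + j + ((pvCnt 1 t ((j : Int) + 1) + 1 : Nat) : Int) by push_cast; ring]
        rw [h]; omega
    · rw [if_neg (fun hc => hx hc.2)]
      rw [pvCnt_head_ne 1 x _ t hx]
      simp only [List.drop_zero, Nat.cast_zero, add_zero, Nat.sub_zero]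
      by_cases hb : x = nb - (n : Int) + (j : Int)
      · rw [if_pos hb, bScan_back nb n t (j+1)]
        rw [show pvCnt 1 (x :: t) (nb - n + j) = pvCnt 1 t (nb - n + j + 1) + 1 by
          simp [pvCnt, hb]]
        have harg : nb - (n : Int) + ((j + 1 : Nat) : Int) = nb - n + j + 1 := by push_cast; ring
        rw [harg]
        simp only [List.length_cons, decide_eq_decide]
        omega
      · rw [if_neg hb, pvCnt_head_ne 1 x _ t hb]
        simp

-- B's whole scan computes the coverage condition f + q ≥ n
lemma bScan_cov (lst : List Int) (nb : Int) :
    bScan nb lst.length lst 0 false =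
      decide (pvCnt 1 lst 0 + pvCnt (-1) lst.reverse (nb - 1) ≥ lst.length) := by
  rw [bScan_front nb lst.length lst 0]
  simp only [Nat.cast_zero]
  set f := pvCnt 1 lst (0 : Int) with hf
  have hfle : f ≤ lst.length := pvCnt_le_length 1 lst 0
  have hdlen : (lst.drop f).length = lst.length - f := by simp
  have hiff := pvCnt_eq_length_iff 1 (lst.drop f) (nb - (lst.length : Int) + 0 + (f : Int))
  rw [pvFull_reverse] at hiff
  have hval : nb - (lst.length : Int) + 0 + (f : Int) + ((lst.drop f).length : Int) - 1
      = nb - 1 := by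
    rw [hdlen]; omega
  rw [hval] at hiff
  have hrevdrop : (lst.drop f).reverse = lst.reverse.take (lst.length - f) := by
    rw [List.reverse_drop]
  have hq : pvCnt (-1) (lst.drop f).reverse (nb - 1)
      = min (pvCnt (-1) lst.reverse (nb - 1)) (lst.length - f) := by
    rw [hrevdrop, pvCnt_take]
  rw [decide_eq_decide]
  rw [hdlen] at hiff
  rw [hiff, ← pvCnt_eq_length_iff (-1) ((lst.drop f).reverse) (nb - 1)]
  rw [hq]
  have hqle : pvCnt (-1) lst.reverse (nb - 1) ≤ lst.length := by
    have := pvCnt_le_length (-1) lst.reverse (nb - 1)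
    simpa using this
  simp only [List.length_reverse, hdlen]
  omega

lemma pvChain_short (s : Int) (l : List Int) (h : l.length ≤ 1) : pvChain s l = 0 := by
  cases l with
  | nil => rfl
  | cons x t =>
    cases t with
    | nil => rfl
    | cons y u => simp at h

lemma aFront_eq (lst : List Int) : ∀ (k i : Nat), lst.length - i ≤ k → i < lst.length →
    aFront lst i = i + pvChain 1 (lst.drop i) := by
  intro k
  induction k with
  | zero => intro i hk hi; omega
  | succ k ih =>
    intro i hk hi
    rw [List.drop_eq_getElem_cons hi]
    by_cases h : i + 1 < lst.length ∧ lst.getD (i+1) 0 = lst.getD i 0 + 1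
    · rw [aFront, dif_pos h]
      rw [ih (i+1) (by omega) h.1]
      rw [List.drop_eq_getElem_cons h.1]
      have hx : lst[i+1] = lst[i] + 1 := by
        rw [← getD_eq_get lst (i+1) h.1, ← getD_eq_get lst i hi]; exact h.2
      simp only [pvChain, if_pos hx]
      omega
    · rw [aFront, dif_neg h]
      rcases Nat.lt_or_ge (i+1) lst.length with hlt | hge
      · rw [List.drop_eq_getElem_cons hlt]
        have hx : ¬ lst[i+1] = lst[i] + 1 := by
          intro hc
          exact h ⟨hlt, by rw [getD_eq_get lst (i+1) hlt, getD_eq_get lst i hi]; exact hc⟩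
        simp [pvChain, hx]
      · rw [List.drop_eq_nil_of_le hge]
        simp [pvChain]

-- Python lst[i] for -len ≤ i < 0 is lst.reverse[(-1-i)]
lemma pyGet_neg (lst : List Int) (i : Int) (h1 : -(lst.length : Int) ≤ i) (h2 : i < 0) :
    (PySem.List.pyGet? lst i).getD 0 = lst.reverse.getD (-1-i).toNat 0 := by
  have hk : (-1-i).toNat < lst.length := by omega
  have hidx : PySem.List.pyIdx? lst.length i = some (lst.length - (-i).toNat) := by
    simp only [PySem.List.pyIdx?]
    rw [if_neg (by omega), if_pos (by omega)]
  simp only [PySem.List.pyGet?, hidx, Option.bind_some]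
  rw [List.getElem?_eq_getElem (show lst.length - (-i).toNat < lst.length by omega)]
  rw [getD_eq_get lst.reverse (-1-i).toNat (by simpa using hk)]
  simp only [Option.getD_some]
  rw [List.getElem_reverse]
  congr 1
  omega

lemma aBack_eq (lst : List Int) : ∀ (k : Nat) (i : Int), ((lst.length : Int) + i).toNat ≤ k →
    -(lst.length : Int) ≤ i → i ≤ -1 →
    aBack lst i = i - pvChain (-1) (lst.reverse.drop (-1-i).toNat) := by
  intro k
  induction k with
  | zero =>
    intro i hk h1 h2
    rw [aBack, dif_neg (fun hcon => absurd hcon.1 (by omega))]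
    rw [pvChain_short _ _ (by simp; omega)]
    simp
  | succ k ih =>
    intro i hk h1 h2
    have hkk : (-1-i).toNat < lst.reverse.length := by simp; omega
    by_cases h : -(lst.length : Int) < i ∧
        (PySem.List.pyGet? lst (i-1)).getD 0 = (PySem.List.pyGet? lst i).getD 0 - 1
    · have hsucc : (-1-(i-1)).toNat = (-1-i).toNat + 1 := by omega
      have hkk1 : (-1-i).toNat + 1 < lst.reverse.length := by simp; omega
      rw [aBack, dif_pos h]
      rw [ih (i-1) (by omega) (by omega) (by omega)]
      rw [hsucc]
      rw [List.drop_eq_getElem_cons hkk, List.drop_eq_getElem_cons hkk1]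
      have hx : lst.reverse[(-1-i).toNat + 1] = lst.reverse[(-1-i).toNat] + (-1) := by
        have h2' := h.2
        rw [pyGet_neg lst (i-1) (by omega) (by omega),
            pyGet_neg lst i (by omega) (by omega)] at h2'
        rw [hsucc] at h2'
        rw [getD_eq_get lst.reverse ((-1-i).toNat + 1) hkk1,
            getD_eq_get lst.reverse ((-1-i).toNat) hkk] at h2'
        omega
      simp only [pvChain, if_pos hx]
      omega
    · rw [aBack, dif_neg h]
      rw [List.drop_eq_getElem_cons hkk]
      rcases Int.lt_or_le (-(lst.length : Int)) i with hlt | hge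
      · have hkk1 : (-1-i).toNat + 1 < lst.reverse.length := by simp; omega
        rw [List.drop_eq_getElem_cons hkk1]
        have hx : ¬ lst.reverse[(-1-i).toNat + 1] = lst.reverse[(-1-i).toNat] + (-1) := by
          intro hc
          apply h
          refine ⟨hlt, ?_⟩
          rw [pyGet_neg lst (i-1) (by omega) (by omega),
              pyGet_neg lst i (by omega) (by omega)]
          rw [show (-1-(i-1)).toNat = (-1-i).toNat + 1 by omega]
          rw [getD_eq_get lst.reverse ((-1-i).toNat + 1) hkk1,
              getD_eq_get lst.reverse ((-1-i).toNat) hkk]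
          omega
        simp only [pvChain]
        rw [if_neg hx]
        simp
      · have hnil : lst.reverse.length ≤ (-1-i).toNat + 1 := by simp; omega
        rw [List.drop_eq_nil_of_le hnil]
        simp [pvChain]

lemma aPhase1_eq (lst : List Int) (h0 : lst ≠ []) : aPhase1 lst = lst.drop (pvCnt 1 lst 0) := by
  obtain ⟨x, t, hxt⟩ := List.exists_cons_of_ne_nil h0
  have hpos : 0 < lst.length := by rw [hxt]; simp
  unfold aPhase1
  by_cases hh : lst.getD 0 0 = 0
  · rw [if_pos hh]
    have hx0 : x = 0 := by
      have := hh; rw [hxt] at this; simpa using this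
    have hA : aFront lst 0 = pvChain 1 lst := by
      have := aFront_eq lst lst.length 0 (by omega) hpos
      simpa using this
    have hchain : pvCnt 1 lst 0 = pvChain 1 lst + 1 := by
      rw [hxt, pvCnt_cons_eq_chain 1 t x 0 hx0, ← hxt]
    have harg : (aFront lst 0 : Int) + 1 = ((pvCnt 1 lst 0 : Nat) : Int) := by
      rw [hA]; rw [hchain]; push_cast; ring
    rw [harg, PySem.List.slice_from_natCast]
  · rw [if_neg hh]
    have hx0 : x ≠ 0 := by
      intro hc; apply hh; rw [hxt, hc]; simp
    rw [hxt, pvCnt_head_ne 1 x 0 t hx0, ← hxt, List.drop_zero]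

-- ===== VERDICT (by name: the statement is the Claim_ definition above) =====
theorem remove_consecutive_elements_spec : Claim_equal_remove_consecutive_elements := by
  intro lst nb_idx _
  unfold Spec_remove_consecutive_elements
  unfold remove_consecutive_elements remove_consecutive_elements_alt
  by_cases h0 : lst.length = 0
  · simp [h0]
  rw [if_neg h0, if_neg h0]
  by_cases hg : (lst.length : Int) > PySem.Int.floordiv nb_idx 2
  · rw [if_pos hg, if_pos hg]
  rw [if_neg hg, if_neg hg]
  have hnil : lst ≠ [] := by intro hc; rw [hc] at h0; simp at h0
  rw [bScan_cov lst nb_idx]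
  rw [aPhase1_eq lst hnil]
  have hple : pvCnt 1 lst 0 ≤ lst.length := pvCnt_le_length 1 lst 0
  have hqle : pvCnt (-1) lst.reverse (nb_idx - 1) ≤ lst.length := by
    have := pvCnt_le_length (-1) lst.reverse (nb_idx - 1)
    simpa using this
  by_cases h1 : (lst.drop (pvCnt 1 lst 0)).length = 0
  · rw [if_pos h1]
    have hcov : pvCnt 1 lst 0 + pvCnt (-1) lst.reverse (nb_idx - 1) ≥ lst.length := by
      simp only [List.length_drop] at h1; omega
    simp [hcov]
  rw [if_neg h1]
  simp only [List.length_drop] at h1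
  have hplt : pvCnt 1 lst 0 < lst.length := by omega
  have hq1 : pvCnt (-1) (lst.drop (pvCnt 1 lst 0)).reverse (nb_idx - 1)
      = min (pvCnt (-1) lst.reverse (nb_idx - 1)) (lst.length - pvCnt 1 lst 0) := by
    rw [List.reverse_drop, pvCnt_take]
  have hlast : (PySem.List.pyGet? (lst.drop (pvCnt 1 lst 0)) (-1)).getD 0
      = (lst.drop (pvCnt 1 lst 0)).reverse.getD 0 0 := by
    rw [pyGet_neg _ (-1) (by simp; omega) (by omega)]
    norm_num
  obtain ⟨y, u, hyu⟩ := List.exists_cons_of_ne_nil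
    (show (lst.drop (pvCnt 1 lst 0)).reverse ≠ [] by
      intro hc
      have := congrArg List.length hc
      simp only [List.length_reverse, List.length_drop, List.length_nil] at this
      omega)
  unfold aPhase2
  by_cases hl : (PySem.List.pyGet? (lst.drop (pvCnt 1 lst 0)) (-1)).getD 0 = nb_idx - 1
  · rw [if_pos hl]
    have hy : y = nb_idx - 1 := by
      rw [hlast, hyu] at hl; simpa using hl
    have hc1 : pvCnt (-1) (lst.drop (pvCnt 1 lst 0)).reverse (nb_idx - 1)
        = pvChain (-1) (lst.drop (pvCnt 1 lst 0)).reverse + 1 := by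
      rw [hyu, pvCnt_cons_eq_chain (-1) u y (nb_idx - 1) hy, ← hyu]
    have hAb : aBack (lst.drop (pvCnt 1 lst 0)) (-1)
        = -1 - pvChain (-1) (lst.drop (pvCnt 1 lst 0)).reverse := by
      have := aBack_eq (lst.drop (pvCnt 1 lst 0)) (lst.drop (pvCnt 1 lst 0)).length (-1)
        (by omega) (by simp; omega) (by omega)
      simpa using this
    have hr1 : 1 ≤ min (pvCnt (-1) lst.reverse (nb_idx - 1)) (lst.length - pvCnt 1 lst 0) := by
      rw [← hq1, hc1]; omega
    have hiAb : aBack (lst.drop (pvCnt 1 lst 0)) (-1)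
        = -((min (pvCnt (-1) lst.reverse (nb_idx - 1)) (lst.length - pvCnt 1 lst 0) : Nat) : Int) := by
      rw [hAb]
      have h5 : pvChain (-1) (lst.drop (pvCnt 1 lst 0)).reverse + 1
          = min (pvCnt (-1) lst.reverse (nb_idx - 1)) (lst.length - pvCnt 1 lst 0) := by
        rw [← hc1, hq1]
      omega
    rw [hiAb]
    rw [PySem.List.slice_to_neg_natCast (lst.drop (pvCnt 1 lst 0)) _ (by omega)]
    simp only [List.length_take, List.length_drop]
    rw [decide_eq_decide]
    omega
  · rw [if_neg hl]
    have hy : y ≠ nb_idx - 1 := by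
      intro hc; apply hl; rw [hlast, hyu]; simpa using hc
    have hc0 : pvCnt (-1) (lst.drop (pvCnt 1 lst 0)).reverse (nb_idx - 1) = 0 := by
      rw [hyu, pvCnt_head_ne (-1) y (nb_idx - 1) u hy]
    have hq0 : pvCnt (-1) lst.reverse (nb_idx - 1) = 0 := by
      rw [hc0] at hq1; omega
    simp only [List.length_drop]
    rw [decide_eq_decide]
    omega
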